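-- pv_equiv track=rewrite | github.com/Aasthaengg/IBMdataset | Python_codes/p03209/s353601073.py | F
-- ===== SOURCE A (Python) =====
-- def f(n):
--     if n==0:
--         return 1
--     return 2*f(n-1)+3
--
-- def g(n):
--     if n==0:
--         return 1
--     return 2*g(n-1)+1
--
-- def F(n,x):
--     if n==0:return 1
--     if x<=n:return 0
--     if x<=f(n-1)+1:
--         return F(n-1,x-1)
--     elif x==f(n-1)+2:
--         return g(n-1)+1
--     else:
--         return g(n-1)+1+F(n-1,x-f(n-1)-2)
-- ===== SOURCE B (Python) =====
-- def F(n, x):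
--     # Iterative descent with an accumulator; f(n-1), g(n-1) by closed form:
--     # f(m) = 2**(m+2) - 3, g(m) = 2**(m+1) - 1.
--     total = 0
--     while True:
--         if n == 0:
--             return total + 1
--         if x <= n:
--             return total
--         fn1 = 2 ** (n + 1) - 3   # f(n-1)
--         gn1 = 2 ** n - 1         # g(n-1)
--         if x <= fn1 + 1:
--             n, x = n - 1, x - 1
--         elif x == fn1 + 2:
--             return total + gn1 + 1
--         else:
--             total += gn1 + 1
--             n, x = n - 1, x - fn1 - 2
-- ===== Notes on version B (the rewrite author's own statement) =====
-- stated objective: faster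
-- what changed: Replaces the recursive F with recomputed recursive helpers f,g at every level by an iterative descent carrying an accumulator and using the closed forms f(m)=2^(m+2)-3, g(m)=2^(m+1)-1, so each level costs O(1).
import Mathlib
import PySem

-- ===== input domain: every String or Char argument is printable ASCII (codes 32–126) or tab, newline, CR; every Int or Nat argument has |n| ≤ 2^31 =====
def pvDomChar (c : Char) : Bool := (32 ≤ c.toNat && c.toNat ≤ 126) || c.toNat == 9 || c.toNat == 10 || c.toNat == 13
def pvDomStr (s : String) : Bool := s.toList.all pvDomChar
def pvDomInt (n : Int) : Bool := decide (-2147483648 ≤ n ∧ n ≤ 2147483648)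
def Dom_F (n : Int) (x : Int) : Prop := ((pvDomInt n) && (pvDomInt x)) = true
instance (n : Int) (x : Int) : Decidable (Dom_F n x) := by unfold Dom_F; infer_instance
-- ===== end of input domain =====

-- B replaces A's recursion-with-recursive-helpers by an iterative descent with an
-- accumulator and closed forms for f and g (objective: faster, O(n) vs O(n^2)).

-- ===== PORT A =====
-- helper f of A
def fA : Nat → Int
  | 0 => 1
  | n + 1 => 2 * fA n + 3

-- helper g of A
def gA : Nat → Int
  | 0 => 1
  | n + 1 => 2 * gA n + 1

-- A's F, recursion expressed on the Nat value of n (Pre_F restricts to 0 ≤ n,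
-- where this matches the Python step for step)
def FA : Nat → Int → Int
  | 0, _ => 1
  | n + 1, x =>
    if x ≤ (n : Int) + 1 then 0
    else if x ≤ fA n + 1 then FA n (x - 1)
    else if x = fA n + 2 then gA n + 1
    else gA n + 1 + FA n (x - fA n - 2)

-- Python's first two checks on the Int argument; the recursion (faithful for n ≥ 0)
-- is FA on n's Nat value
def F (n : Int) (x : Int) : Int :=
  if n = 0 then 1
  else if x ≤ n then 0
  else FA n.toNat x

-- ===== PORT B =====
-- Source B's while-loop: n counts down, total accumulates
def FB : Nat → Int → Int → Int
  | 0, _, total => total + 1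
  | n + 1, x, total =>
    if x ≤ (n : Int) + 1 then total
    else
      let fn1 : Int := 2 ^ (n + 2) - 3
      let gn1 : Int := 2 ^ (n + 1) - 1
      if x ≤ fn1 + 1 then FB n (x - 1) total
      else if x = fn1 + 2 then total + gn1 + 1
      else FB n (x - fn1 - 2) (total + gn1 + 1)

def F_alt (n : Int) (x : Int) : Int :=
  if n = 0 then 0 + 1
  else if x ≤ n then 0
  else FB n.toNat x 0

-- ===== PRECONDITION & SPEC =====
-- Pre_F excludes n < 0 with x > n, exactly where Python's F recurses without a base case and raises RecursionError.
def Pre_F (n : Int) (x : Int) : Prop := 0 ≤ n ∨ x ≤ n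
instance (n : Int) (x : Int) : Decidable (Pre_F n x) := by unfold Pre_F; infer_instance
def pvWitness_F : Int × Int := (3, 7)

def Spec_F (n : Int) (x : Int) (out : Int) : Prop := out = F_alt n x
instance (n : Int) (x : Int) (out : Int) : Decidable (Spec_F n x out) := by unfold Spec_F; infer_instance

-- ===== CLAIM (what is proved, stated in full; the proofs are below) =====
def Claim_equal_F : Prop := ∀ (n : Int) (x : Int), Dom_F n x → Pre_F n x → Spec_F n x (F n x)

-- ===== LEMMAS AND PROOFS =====
theorem fA_closed (n : Nat) : fA n = 2 ^ (n + 2) - 3 := by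
  induction n with
  | zero => simp [fA]
  | succ m ih => simp [fA, ih, pow_succ]; ring

theorem gA_closed (n : Nat) : gA n = 2 ^ (n + 1) - 1 := by
  induction n with
  | zero => simp [gA]
  | succ m ih => simp [gA, ih, pow_succ]; ring

theorem FB_eq (n : Nat) : ∀ (x total : Int), FB n x total = total + FA n x := by
  induction n with
  | zero => intro x t; simp [FB, FA]
  | succ m ih =>
    intro x t
    simp only [FB, FA, fA_closed, gA_closed]
    split_ifs with h1 h2 h3 <;> simp [ih] <;> ring

-- ===== VERDICT (by name: the statement is the Claim_ definition above) =====
theorem F_spec : Claim_equal_F := by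
  intro n x _ _
  unfold Spec_F F F_alt
  split_ifs <;> simp [FB_eq]
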